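-- pv_equiv track=rewrite | github.com/flaneurette/PythonMIDI | helpers.py | writeChunk
-- ===== SOURCE A (Python) =====
-- def writeChunk(digit,length):
--     chunk = ''
--     d = hex(int(digit))
--     d = d[2:] if len(d) % 2 == 0 else '0' + d[2:]
--     bytes = ' '.join(d[i:i+2] for i in range(0, len(d), 2))
--     bucket = bytes.split()
--     for i in range(len(bucket),length):
--         chunk += '00 '
--     chunk += bytes.upper()
--     return chunk.split()
-- ===== SOURCE B (Python) =====
-- def writeChunk(digit, length):
--     # Chunk the hex digits right-to-left two at a time (no parity pre-padding,
--     # no join/split roundtrip), building the byte list back-to-front, then pad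
--     # to `length` bytes and reverse once at the end.
--     s = hex(int(digit))[2:].upper()
--     out = []
--     while len(s) > 2:
--         out.append(s[-2:])
--         s = s[:-2]
--     out.append(s if len(s) == 2 else '0' + s)
--     while len(out) < length:
--         out.append('00')
--     out.reverse()
--     return out
-- ===== Notes on version B (the rewrite author's own statement) =====
-- stated objective: alternative
-- what changed: B drops A's parity branch, space-join/split roundtrip and '00 '-token loop: it chunks the raw hex(digit)[2:] string right-to-left two characters at a time (zero-prefixing only a final odd leftover), accumulating the byte list back-to-front, pads the accumulator to `length` and reverses once.
import Mathlib
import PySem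

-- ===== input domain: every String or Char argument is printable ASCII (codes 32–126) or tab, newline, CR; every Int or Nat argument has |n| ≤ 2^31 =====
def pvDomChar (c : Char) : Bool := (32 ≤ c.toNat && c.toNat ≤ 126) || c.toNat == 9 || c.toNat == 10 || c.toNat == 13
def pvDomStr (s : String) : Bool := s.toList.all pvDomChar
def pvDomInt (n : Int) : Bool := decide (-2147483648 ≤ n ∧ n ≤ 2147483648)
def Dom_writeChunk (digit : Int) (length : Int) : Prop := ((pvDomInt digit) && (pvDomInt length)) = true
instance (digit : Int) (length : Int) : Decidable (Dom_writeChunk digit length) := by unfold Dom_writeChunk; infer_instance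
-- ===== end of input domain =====

-- B replaces A's parity branch + space-join/split roundtrip + '00 '-token loop by right-to-left
-- two-character chunking of hex(digit)[2:], accumulating back-to-front, then padding and one reverse
-- (objective: alternative decomposition, same cost).

-- hand port of Python's hex(): '-0x'+digits for n<0 else '0x'+digits, lowercase, hex(0)='0x0';
-- exact for every Int (digits of |n|, most significant first).
def pvHexDigitChar (n : Nat) : Char := if n < 10 then Char.ofNat (48 + n) else Char.ofNat (87 + n)
def pvHexDigits (n : Nat) : List Char :=
  if h : n = 0 then [] else pvHexDigits (n / 16) ++ [pvHexDigitChar (n % 16)]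
  decreasing_by exact Nat.div_lt_self (Nat.pos_of_ne_zero h) (by norm_num)
def pvHex (n : Int) : List Char :=
  (if n < 0 then ['-'] else []) ++ '0' :: 'x' :: (if n.natAbs = 0 then ['0'] else pvHexDigits n.natAbs)

-- ===== PORT A =====
-- len(d) % 2 uses Nat %: exact, a Python len is never negative.
def writeChunk (digit : Int) (length : Int) : List String :=
  let d0 := pvHex digit
  let d := if d0.length % 2 == 0 then PySem.List.slice d0 (some 2) none
           else '0' :: PySem.List.slice d0 (some 2) none
  let bytes := PySem.Chars.join [' '] ((PySem.List.pyRange 0 (d.length : Int) 2).map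
                 (fun i => PySem.List.slice d (some i) (some (i + 2))))
  let bucket := PySem.Chars.split₀ bytes
  let chunk := (PySem.List.pyRange (bucket.length : Int) length 1).foldl
                 (fun acc _ => acc ++ ['0', '0', ' ']) []
  let chunk2 := chunk ++ PySem.Chars.upper bytes
  (PySem.Chars.split₀ chunk2).map String.ofList

-- ===== PORT B =====
-- the 'while len(s) > 2: out.append(s[-2:]); s = s[:-2]' loop plus the final append,
-- as a recursion on s (each step drops the last two chars); result is `out` back-to-front
def pvChunkR (s : List Char) : List (List Char) :=
  if h : 2 < s.length then
    PySem.List.slice s (some (-2)) none :: pvChunkR (PySem.List.slice s none (some (-2)))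
  else [if s.length == 2 then s else '0' :: s]
  decreasing_by rw [PySem.List.slice_to_neg_ofNat s 2 (by omega)]; simp; omega

-- the 'while len(out) < length: out.append('00')' loop, as a recursion on the shortfall
def pvPadTo (length : Int) (out : List (List Char)) : List (List Char) :=
  if h : (out.length : Int) < length then pvPadTo length (out ++ [['0', '0']]) else out
  termination_by (length - out.length).toNat
  decreasing_by simp; omega

def writeChunk_alt (digit : Int) (length : Int) : List String :=
  let s := PySem.Chars.upper (PySem.List.slice (pvHex digit) (some 2) none)
  let out := pvPadTo length (pvChunkR s)
  out.reverse.map String.ofList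

-- ===== PRECONDITION & SPEC =====
def Spec_writeChunk (digit : Int) (length : Int) (out : List String) : Prop := out = writeChunk_alt digit length
instance (digit : Int) (length : Int) (out : List String) : Decidable (Spec_writeChunk digit length out) := by unfold Spec_writeChunk; infer_instance

-- ===== CLAIM (what is proved, stated in full; the proofs are below) =====
def Claim_equal_writeChunk : Prop := ∀ (digit : Int) (length : Int), Dom_writeChunk digit length → Spec_writeChunk digit length (writeChunk digit length)

-- ===== LEMMAS AND PROOFS =====

def pvPairs : List Char → List (List Char)
  | a :: b :: t => [a, b] :: pvPairs t
  | _ => []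

-- left zero-padding to even length, the normal-form companion of both ports
def pvPad (t : List Char) : List Char := if t.length % 2 == 1 then '0' :: t else t

lemma pvPairs_map (f : Char → Char) : ∀ d : List Char, pvPairs (d.map f) = (pvPairs d).map (List.map f) := by
  intro d
  induction d using pvPairs.induct with
  | case1 a b t ih => simp [pvPairs, ih]
  | case2 d h =>
    cases d with
    | nil => rfl
    | cons a t =>
      cases t with
      | nil => rfl
      | cons b t' => exact absurd rfl (h a b t')

lemma pvPairs_mem : ∀ (d p : List Char), p ∈ pvPairs d → p ≠ [] ∧ ∀ c ∈ p, c ∈ d := by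
  intro d
  induction d using pvPairs.induct with
  | case1 a b t ih =>
    intro p hp
    rcases List.mem_cons.mp hp with rfl | hp'
    · exact ⟨by simp, by intro c hc; simp at hc; rcases hc with rfl | rfl <;> simp⟩
    · obtain ⟨h1, h2⟩ := ih p hp'
      exact ⟨h1, fun c hc => by simp [h2 c hc]⟩
  | case2 d h =>
    cases d with
    | nil => intro p hp; simp [pvPairs] at hp
    | cons a t =>
      cases t with
      | nil => intro p hp; simp [pvPairs] at hp
      | cons b t' => exact absurd rfl (h a b t')

lemma pvRange_pairs : ∀ (m : Nat) (d : List Char), d.length = 2 * m →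
    (List.range m).map (fun k => (d.drop (2 * k)).take 2) = pvPairs d := by
  intro m
  induction m with
  | zero => intro d h; have hd : d = [] := List.length_eq_zero_iff.mp (by omega); subst hd; rfl
  | succ m ih =>
    intro d h
    match d with
    | [] => simp at h
    | [a] => simp at h; omega
    | a :: b :: t =>
      rw [List.range_succ_eq_map, List.map_cons, List.map_map]
      have : ((fun k => (((a::b::t).drop (2*k)).take 2)) ∘ Nat.succ) = (fun k => ((t.drop (2*k)).take 2)) := by
        funext k
        have : 2 * Nat.succ k = (2 * k) + 1 + 1 := by omega
        simp [this, List.drop_succ_cons]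
      rw [this, ih t (by simp at h; omega)]
      simp [pvPairs]

lemma pvChunk_eq (d : List Char) (m : Nat) (h : d.length = 2 * m) :
    (PySem.List.pyRange 0 (d.length : Int) 2).map
      (fun i => PySem.List.slice d (some i) (some (i + 2))) = pvPairs d := by
  rw [PySem.List.pyRange_of_pos 0 _ (by norm_num)]
  have hc : (if (0:Int) < (d.length : Int) then (((d.length : Int) - 0 + 2 - 1) / 2).toNat else 0) = m := by
    rw [h]; push_cast; split <;> omega
  rw [hc, List.map_map]
  have : ((fun i => PySem.List.slice d (some i) (some (i + 2))) ∘ (fun k : Nat => (0 : Int) + 2 * ↑k))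
      = fun k : Nat => (d.drop (2 * k)).take 2 := by
    funext k
    simp only [Function.comp]
    rw [PySem.List.slice_toNat d (by omega) (by omega)]
    have h1 : ((0 : Int) + 2 * (k:Int)).toNat = 2 * k := by omega
    have h2 : ((0 : Int) + 2 * (k:Int) + 2).toNat - 2 * k = 2 := by omega
    rw [h1, h2]
  rw [this, pvRange_pairs m d h]

def pvL : List Char := ['0','1','2','3','4','5','6','7','8','9','a','b','c','d','e','f','x']
lemma pvL_facts : ∀ c ∈ pvL, PySem.Chars.isspace c = false ∧
    PySem.Chars.isspace (PySem.Chars.upperChar c) = false := by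
  intro c hc
  simp only [pvL, List.mem_cons] at hc
  rcases hc with rfl|rfl|rfl|rfl|rfl|rfl|rfl|rfl|rfl|rfl|rfl|rfl|rfl|rfl|rfl|rfl|rfl|h <;> first
    | exact ⟨by decide, by decide⟩
    | simp at h

lemma pvGo_word : ∀ (w : List Char), (∀ c ∈ w, PySem.Chars.isspace c = false) →
    ∀ (rest cur : List Char) (acc : List (List Char)),
    PySem.Chars.split₀.go (w ++ rest) cur acc = PySem.Chars.split₀.go rest (w.reverse ++ cur) acc := by
  intro w
  induction w with
  | nil => intro _ rest cur acc; simp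
  | cons c w ih =>
    intro h rest cur acc
    have hc : PySem.Chars.isspace c = false := h c (by simp)
    rw [List.cons_append, PySem.Chars.split₀.go, hc]
    simp only [Bool.false_eq_true, if_false]
    rw [ih (fun x hx => h x (by simp [hx])) rest (c :: cur) acc]
    simp

lemma pvGo_join : ∀ (parts : List (List Char)),
    (∀ p ∈ parts, p ≠ [] ∧ ∀ c ∈ p, PySem.Chars.isspace c = false) →
    ∀ acc, PySem.Chars.split₀.go (PySem.Chars.join [' '] parts) [] acc = acc.reverse ++ parts := by
  intro parts
  induction parts with
  | nil =>
    intro _ acc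
    rw [show PySem.Chars.join [' '] [] = [] from rfl, PySem.Chars.split₀.go]
    simp
  | cons p rest ih =>
    intro h acc
    obtain ⟨hp, hpc⟩ := h p (by simp)
    cases rest with
    | nil =>
      rw [PySem.Chars.join_singleton]
      have := pvGo_word p hpc [] [] acc
      simp only [List.append_nil] at this
      rw [this, PySem.Chars.split₀.go]
      simp [hp]
    | cons q rest' =>
      rw [PySem.Chars.join_cons_cons]
      rw [List.append_assoc, pvGo_word p hpc _ [] acc]
      simp only [List.singleton_append, List.append_nil]
      rw [PySem.Chars.split₀.go]
      have hsp : PySem.Chars.isspace ' ' = true := by decide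
      have hne : p.reverse.isEmpty = false := by simp [hp]
      simp only [hsp, if_true, hne, Bool.false_eq_true, if_false]
      rw [ih (fun x hx => h x (by simp [hx])) (p.reverse.reverse :: acc)]
      simp

lemma pvGo_prefix : ∀ (k : Nat) (rest : List Char) (acc : List (List Char)),
    PySem.Chars.split₀.go ((List.replicate k ['0','0',' ']).flatten ++ rest) [] acc =
      PySem.Chars.split₀.go rest [] (List.replicate k ['0','0'] ++ acc) := by
  intro k
  induction k with
  | zero => intro rest acc; simp
  | succ k ih =>
    intro rest acc
    rw [List.replicate_succ, List.replicate_succ]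
    have hsh : (['0','0',' '] :: List.replicate k ['0','0',' ']).flatten ++ rest =
        ['0','0'] ++ (' ' :: ((List.replicate k ['0','0',' ']).flatten ++ rest)) := by simp
    rw [hsh, pvGo_word ['0','0'] (by intro c hc; fin_cases hc <;> decide)]
    rw [PySem.Chars.split₀.go]
    have hsp : PySem.Chars.isspace ' ' = true := by decide
    simp only [hsp, if_true, List.append_nil]
    have hne : (['0','0'] : List Char).reverse.isEmpty = false := by decide
    simp only [hne, Bool.false_eq_true, if_false]
    rw [ih]
    have hrc : ∀ (n : Nat) (x : List Char) (acc : List (List Char)),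
        List.replicate n x ++ x :: acc = x :: (List.replicate n x ++ acc) := by
      intro n x acc
      induction n with
      | zero => rfl
      | succ n ihn => simp [List.replicate_succ, ihn]
    rw [List.reverse_reverse, hrc, List.cons_append]

lemma pvUpper_join : ∀ parts : List (List Char),
    PySem.Chars.upper (PySem.Chars.join [' '] parts) =
      PySem.Chars.join [' '] (parts.map PySem.Chars.upper) := by
  intro parts
  induction parts with
  | nil => rfl
  | cons p rest ih =>
    cases rest with
    | nil => simp [PySem.Chars.join_singleton]
    | cons q rest' =>
      rw [PySem.Chars.join_cons_cons, List.map_cons]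
      rw [show ((q :: rest').map PySem.Chars.upper) = PySem.Chars.upper q :: rest'.map PySem.Chars.upper from rfl]
      rw [PySem.Chars.join_cons_cons]
      simp only [PySem.Chars.upper, List.map_append] at *
      rw [ih]
      have hsp : List.map PySem.Chars.upperChar [' '] = [' '] := by decide
      rw [hsp]
      rfl

lemma pvFoldl_rep : ∀ (l : List Int) (init : List Char),
    l.foldl (fun acc _ => acc ++ ['0','0',' ']) init = init ++ (List.replicate l.length ['0','0',' ']).flatten := by
  intro l
  induction l with
  | nil => intro init; simp
  | cons x l ih => intro init; rw [List.foldl_cons, ih]; simp [List.replicate_succ]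

lemma pvRange_one_length (a b : Int) : (PySem.List.pyRange a b 1).length = (b - a).toNat := by
  rw [PySem.List.pyRange_of_pos a b (by norm_num)]
  simp only [List.length_map, List.length_range]
  split <;> omega

lemma pvHexDigitChar_mem : ∀ n, n < 16 → pvHexDigitChar n ∈ pvL := by decide

lemma pvHexDigits_mem : ∀ n, ∀ c ∈ pvHexDigits n, c ∈ pvL := by
  intro n
  induction n using pvHexDigits.induct with
  | case1 => intro c hc; rw [pvHexDigits, dif_pos rfl] at hc; simp at hc
  | case2 n h ih =>
    intro c hc
    rw [pvHexDigits, dif_neg h] at hc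
    rcases List.mem_append.mp hc with h1 | h2
    · exact ih c h1
    · simp at h2
      rw [h2]
      exact pvHexDigitChar_mem _ (Nat.mod_lt _ (by norm_num))

lemma pvHexDigits_ne_nil (n : Nat) (h : n ≠ 0) : pvHexDigits n ≠ [] := by
  rw [pvHexDigits, dif_neg h]; simp

lemma pvHex_len (digit : Int) : 3 ≤ (pvHex digit).length := by
  have htail : (if digit.natAbs = 0 then ['0'] else pvHexDigits digit.natAbs) ≠ [] := by
    split
    · simp
    · exact pvHexDigits_ne_nil _ (by assumption)
  have h1 : 0 < (if digit.natAbs = 0 then ['0'] else pvHexDigits digit.natAbs).length :=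
    List.length_pos_iff.mpr htail
  unfold pvHex
  split <;> simp only [List.cons_append, List.nil_append, List.length_cons] <;> omega

lemma pvHex_mem (digit : Int) : ∀ c ∈ (pvHex digit).drop 2, c ∈ pvL := by
  have htail : ∀ c ∈ (if digit.natAbs = 0 then ['0'] else pvHexDigits digit.natAbs), c ∈ pvL := by
    split
    · intro c hc; simp at hc; rw [hc]; decide
    · exact pvHexDigits_mem _
  intro c hc
  unfold pvHex at hc
  by_cases hneg : digit < 0
  · rw [if_pos hneg] at hc
    simp only [List.cons_append, List.nil_append, List.drop_succ_cons, List.drop_zero] at hc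
    rcases List.mem_cons.mp hc with rfl | hc'
    · decide
    · exact htail c hc'
  · rw [if_neg hneg] at hc
    simp only [List.nil_append, List.drop_succ_cons, List.drop_zero] at hc
    exact htail c hc

-- A's parity-branched d is left zero-padding of hex(digit)[2:] to even length
lemma pvD_eq_pad (digit : Int) :
    (if (pvHex digit).length % 2 == 0 then PySem.List.slice (pvHex digit) (some 2) none
     else '0' :: PySem.List.slice (pvHex digit) (some 2) none)
    = pvPad (PySem.List.slice (pvHex digit) (some 2) none) := by
  have hsl : PySem.List.slice (pvHex digit) (some 2) none = (pvHex digit).drop 2 :=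
    PySem.List.slice_from _ (by norm_num)
  have h3 := pvHex_len digit
  unfold pvPad
  rw [hsl]
  have hlen : ((pvHex digit).drop 2).length = (pvHex digit).length - 2 := by simp
  by_cases h : (pvHex digit).length % 2 = 0
  · rw [if_pos (by simpa using h), if_neg (by simp only [beq_iff_eq, hlen]; omega)]
  · rw [if_neg (by simpa using h), if_pos (by simp only [beq_iff_eq, hlen]; omega)]

lemma pvPad_even (t : List Char) : (pvPad t).length % 2 = 0 := by
  unfold pvPad; split
  · next h => simp only [beq_iff_eq] at h; simp [List.length_cons]; omega
  · next h => simp only [beq_iff_eq] at h; omega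

lemma pvPad_ne_nil (t : List Char) (h : t ≠ []) : pvPad t ≠ [] := by
  unfold pvPad; split
  · simp
  · exact h

lemma pvPad_mem (t : List Char) (h : ∀ c ∈ t, c ∈ pvL) : ∀ c ∈ pvPad t, c ∈ pvL := by
  unfold pvPad; split
  · intro c hc
    rcases List.mem_cons.mp hc with rfl | hc'
    · decide
    · exact h c hc'
  · exact h

lemma pvUpper_pad (t : List Char) : PySem.Chars.upper (pvPad t) = pvPad (PySem.Chars.upper t) := by
  have h0 : PySem.Chars.upperChar '0' = '0' := by decide
  unfold pvPad
  simp only [PySem.Chars.upper, List.length_map]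
  split
  · simp [h0]
  · rfl

lemma pvPairs_two (l : List Char) (h : l.length = 2) : pvPairs l = [l] := by
  obtain ⟨a, b, rfl⟩ := List.length_eq_two.mp h
  rfl

lemma pvPairs_append_even : ∀ (u v : List Char), u.length % 2 = 0 →
    pvPairs (u ++ v) = pvPairs u ++ pvPairs v := by
  intro u
  induction u using pvPairs.induct with
  | case1 a b t ih =>
    intro v h
    simp only [List.cons_append, pvPairs]
    rw [ih v (by simp at h; omega)]
  | case2 u h =>
    cases u with
    | nil => intro v _; rfl
    | cons a t =>
      cases t with
      | nil => intro v hv; simp at hv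
      | cons b t' => exact absurd rfl (h a b t')

-- the right-to-left chunking loop of B equals the reversed pair list of the padded string
lemma pvChunkR_eq : ∀ s : List Char, s ≠ [] → pvChunkR s = (pvPairs (pvPad s)).reverse := by
  intro s
  induction s using pvChunkR.induct with
  | case1 s h ih =>
    intro _
    rw [pvChunkR, dif_pos h]
    rw [PySem.List.slice_from_neg_ofNat s 2 (by omega), PySem.List.slice_to_neg_ofNat s 2 (by omega)] at *
    have htne : s.take (s.length - 2) ≠ [] := by
      intro hnil
      have := congrArg List.length hnil
      simp at this
      omega
    rw [ih htne]
    have hsplit : pvPad s = pvPad (s.take (s.length - 2)) ++ s.drop (s.length - 2) := by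
      unfold pvPad
      have hlt : (s.take (s.length - 2)).length = s.length - 2 := by simp
      have hpar : (s.take (s.length - 2)).length % 2 = s.length % 2 := by rw [hlt]; omega
      rw [hpar]
      split
      · simp [List.take_append_drop]
      · simp [List.take_append_drop]
    rw [hsplit, pvPairs_append_even _ _ (pvPad_even _)]
    rw [pvPairs_two (s.drop (s.length - 2)) (by simp; omega)]
    simp
  | case2 s h =>
    intro hne
    rw [pvChunkR, dif_neg h]
    have hlen : s.length = 1 ∨ s.length = 2 := by
      have : 0 < s.length := List.length_pos_iff.mpr hne
      omega
    rcases hlen with h1 | h2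
    · rw [if_neg (by simp [h1]), show pvPad s = '0' :: s by unfold pvPad; rw [if_pos (by simp [h1])]]
      obtain ⟨a, rfl⟩ := List.length_eq_one_iff.mp h1
      rfl
    · rw [if_pos (by simp [h2]), show pvPad s = s by unfold pvPad; rw [if_neg (by simp [h2])]]
      rw [pvPairs_two s h2]
      rfl

-- the padding loop of B appends exactly the shortfall many '00' entries
lemma pvPadTo_eq : ∀ (L : Int) (out : List (List Char)),
    pvPadTo L out = out ++ List.replicate ((L - out.length).toNat) ['0','0'] := by
  intro L out
  induction out using pvPadTo.induct L with
  | case1 out h ih =>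
    rw [pvPadTo, dif_pos h, ih]
    have hk : (L - out.length).toNat = (L - (out ++ [['0','0']]).length).toNat + 1 := by
      simp; omega
    rw [hk]
    simp [List.replicate_succ]
  | case2 out h =>
    rw [pvPadTo, dif_neg h]
    have : (L - out.length).toNat = 0 := by omega
    rw [this]
    simp

-- A's whole pipeline, for an even-length nonempty d of hex/'x' chars, in normal form
lemma pvA_normal (d : List Char) (L : Int) (hmem : ∀ c ∈ d, c ∈ pvL) (hne : d ≠ [])
    (hev : d.length % 2 = 0) :
    (PySem.Chars.split₀
      ((PySem.List.pyRange ((PySem.Chars.split₀ (PySem.Chars.join [' ']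
          ((PySem.List.pyRange 0 (d.length : Int) 2).map
            (fun i => PySem.List.slice d (some i) (some (i + 2)))))).length : Int) L 1).foldl
          (fun acc _ => acc ++ ['0', '0', ' ']) [] ++
        PySem.Chars.upper (PySem.Chars.join [' ']
          ((PySem.List.pyRange 0 (d.length : Int) 2).map
            (fun i => PySem.List.slice d (some i) (some (i + 2))))))).map String.ofList =
    (List.replicate ((L - ((pvPairs d).length : Int)).toNat) ['0','0'] ++
      (pvPairs d).map PySem.Chars.upper).map String.ofList := by
  obtain ⟨m, hm⟩ : ∃ m, d.length = 2 * m := ⟨d.length / 2, by omega⟩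
  rw [pvChunk_eq d m hm]
  have hparts : ∀ p ∈ pvPairs d, p ≠ [] ∧ ∀ c ∈ p, PySem.Chars.isspace c = false := by
    intro p hp
    obtain ⟨hne', hsub⟩ := pvPairs_mem d p hp
    exact ⟨hne', fun c hc => (pvL_facts c (hmem c (hsub c hc))).1⟩
  have hbucket : PySem.Chars.split₀ (PySem.Chars.join [' '] (pvPairs d)) = pvPairs d := by
    show PySem.Chars.split₀.go _ [] [] = _
    rw [pvGo_join _ hparts]
    rfl
  rw [hbucket, pvFoldl_rep, pvRange_one_length, pvUpper_join]
  set k : Nat := (L - ((pvPairs d).length : Int)).toNat with hk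
  have hparts' : ∀ p ∈ (pvPairs d).map PySem.Chars.upper,
      p ≠ [] ∧ ∀ c ∈ p, PySem.Chars.isspace c = false := by
    intro p hp
    obtain ⟨q, hq, rfl⟩ := List.mem_map.mp hp
    obtain ⟨hq1, hq2⟩ := pvPairs_mem d q hq
    constructor
    · simp [PySem.Chars.upper, hq1]
    · intro c hc
      obtain ⟨c0, hc0, rfl⟩ := List.mem_map.mp hc
      exact (pvL_facts c0 (hmem c0 (hq2 c0 hc0))).2
  have hA : PySem.Chars.split₀ ([] ++ (List.replicate k ['0','0',' ']).flatten ++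
      PySem.Chars.join [' '] ((pvPairs d).map PySem.Chars.upper)) =
      List.replicate k ['0','0'] ++ (pvPairs d).map PySem.Chars.upper := by
    show PySem.Chars.split₀.go _ [] [] = _
    rw [List.nil_append, pvGo_prefix, pvGo_join _ hparts']
    simp [List.reverse_replicate]
  rw [hA]

-- ===== VERDICT (by name: the statement is the Claim_ definition above) =====
theorem writeChunk_spec : Claim_equal_writeChunk := by
  intro digit L _
  unfold Spec_writeChunk writeChunk writeChunk_alt
  dsimp only
  set t : List Char := PySem.List.slice (pvHex digit) (some 2) none with ht
  have htd : t = (pvHex digit).drop 2 := PySem.List.slice_from _ (by norm_num)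
  have htne : t ≠ [] := by
    rw [htd]
    intro hnil
    have := congrArg List.length hnil
    have h3 := pvHex_len digit
    simp at this
    omega
  have htmem : ∀ c ∈ t, c ∈ pvL := by rw [htd]; exact pvHex_mem digit
  -- A side
  rw [pvD_eq_pad digit]
  rw [pvA_normal (pvPad t) L (pvPad_mem t htmem) (pvPad_ne_nil t htne) (pvPad_even t)]
  -- B side
  have hsne : PySem.Chars.upper t ≠ [] := by
    simp only [PySem.Chars.upper]
    simpa using htne
  rw [pvChunkR_eq _ hsne, ← pvUpper_pad t]
  have hup : PySem.Chars.upper (pvPad t) = (pvPad t).map PySem.Chars.upperChar := rfl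
  rw [hup, pvPairs_map, pvPadTo_eq]
  simp [List.reverse_append, List.reverse_replicate, PySem.Chars.upper]
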